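-- pv_equiv track=rewrite | github.com/TheSmartMonkey/chatbot | all_chatbots/chatbotFactBase.py | text_contains
-- ===== SOURCE A (Python) =====
-- def text_contains(text,refdict):
--     words = text.lower().split(" ")
--     for i in range(0, len(words)):
--         for j in range(len(words), i, -1):
--             name = " ".join(words[i:j])
--             if  name in refdict:
--                 return refdict[name]
--     return None
-- ===== SOURCE B (Python) =====
-- def text_contains(text, refdict):
--     words = text.lower().split(" ")
--     n = len(words)
--     # distinct word-counts of the keys (spaces + 1), largest first: a joined
--     # phrase of L words can only equal a key whose own word-count is L
--     lengths = sorted({k.count(" ") + 1 for k in refdict}, reverse=True)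
--     # all candidate phrases, in A's priority order (start ascending, length descending)
--     candidates = [" ".join(words[i:i + L])
--                   for i in range(n)
--                   for L in lengths
--                   if L <= n - i]
--     for name in candidates:
--         if name in refdict:
--             return refdict[name]
--     return None
-- ===== Notes on version B (the rewrite author's own statement) =====
-- stated objective: alternative
-- what changed: A joins and looks up every substring words[i:j] in two nested loops; B first precomputes the distinct word-counts of the dict keys (spaces+1) once, builds in one comprehension the flat list of only those phrases whose length is a key word-count (start ascending, length descending), and then does a single lookup pass over that list.
import Mathlib
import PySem

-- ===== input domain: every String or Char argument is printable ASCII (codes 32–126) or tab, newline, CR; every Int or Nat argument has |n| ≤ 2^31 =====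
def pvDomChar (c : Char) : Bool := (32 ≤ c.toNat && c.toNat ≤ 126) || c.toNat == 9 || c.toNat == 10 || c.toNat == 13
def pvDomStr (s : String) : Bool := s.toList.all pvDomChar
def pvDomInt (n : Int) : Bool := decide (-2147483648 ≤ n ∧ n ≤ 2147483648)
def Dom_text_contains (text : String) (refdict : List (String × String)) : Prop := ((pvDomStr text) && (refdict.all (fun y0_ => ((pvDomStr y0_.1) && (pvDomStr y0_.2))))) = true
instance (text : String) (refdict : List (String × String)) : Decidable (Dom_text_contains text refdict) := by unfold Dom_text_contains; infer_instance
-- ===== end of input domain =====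

-- B replaces A's nested scan of every substring words[i:j] by one precomputed flat list of
-- only the phrases whose word-count is a key word-count, then a single lookup pass;
-- objective: alternative algorithm.

-- ===== PORT A =====
-- inner loop: for j in range(len(words), i, -1): name = " ".join(words[i:j]); if name in refdict: return refdict[name]
def tcInnerA (d : PySem.Dict String String) (words : List String) (i : Int) : List Int → Option String
  | [] => none
  | j :: js =>
    match d.get? (PySem.Str.join " " (PySem.List.slice words (some i) (some j))) with
    | some v => some v
    | none => tcInnerA d words i js

-- outer loop: for i in range(0, len(words)): …
def tcOuterA (d : PySem.Dict String String) (words : List String) : List Int → Option String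
  | [] => none
  | i :: is =>
    match tcInnerA d words i (PySem.List.pyRange (words.length : Int) i (-1)) with
    | some v => some v
    | none => tcOuterA d words is

def text_contains (text : String) (refdict : List (String × String)) : Option String :=
  let words := (PySem.Str.split? (PySem.Str.lower text) " ").getD []
  tcOuterA (PySem.Dict.mk refdict) words (PySem.List.pyRange 0 (words.length : Int) 1)

-- ===== PORT B =====
def text_contains_alt (text : String) (refdict : List (String × String)) : Option String :=
  let words := (PySem.Str.split? (PySem.Str.lower text) " ").getD []
  let n : Int := words.length
  -- lengths = sorted({k.count(" ") + 1 for k in refdict}, reverse=True)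
  let lengths := PySem.List.sorted
    (PySem.Set.ofList (refdict.map (fun kv => ((PySem.Str.count kv.1 " " : Int) + 1))))
    (fun x => x) true
  -- candidates = [" ".join(words[i:i+L]) for i in range(n) for L in lengths if L <= n - i]
  let candidates := (PySem.List.pyRange 0 n 1).flatMap (fun i =>
    (lengths.filter (fun L => decide (L ≤ n - i))).map (fun L =>
      PySem.Str.join " " (PySem.List.slice words (some i) (some (i + L)))))
  -- for name in candidates: if name in refdict: return refdict[name]  /  return None
  candidates.findSome? (fun name => (PySem.Dict.mk refdict).get? name)

-- ===== PRECONDITION & SPEC =====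
def Spec_text_contains (text : String) (refdict : List (String × String)) (out : Option String) : Prop := out = text_contains_alt text refdict
instance (text : String) (refdict : List (String × String)) (out : Option String) : Decidable (Spec_text_contains text refdict out) := by unfold Spec_text_contains; infer_instance

-- ===== CLAIM (what is proved, stated in full; the proofs are below) =====
def Claim_equal_text_contains : Prop := ∀ (text : String) (refdict : List (String × String)), Dom_text_contains text refdict → Spec_text_contains text refdict (text_contains text refdict)

-- ===== LEMMAS AND PROOFS =====

-- the lookup A's inner loop performs for the phrase words[i:j]
def tcF (d : PySem.Dict String String) (words : List String) (i j : Int) : Option String :=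
  d.get? (PySem.Str.join " " (PySem.List.slice words (some i) (some j)))

-- the set of key word-counts B precomputes
def tcS (refdict : List (String × String)) : List Int :=
  PySem.Set.ofList (refdict.map (fun kv => ((PySem.Str.count kv.1 " " : Int) + 1)))

lemma tcInnerA_eq_findSome? (d : PySem.Dict String String) (words : List String) (i : Int)
    (js : List Int) : tcInnerA d words i js = js.findSome? (tcF d words i) := by
  induction js with
  | nil => rfl
  | cons j js ih =>
    simp only [tcInnerA, List.findSome?]
    cases h : d.get? (PySem.Str.join " " (PySem.List.slice words (some i) (some j))) <;>
      simp [tcF, h, ih]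

lemma tcOuterA_eq_findSome? (d : PySem.Dict String String) (words : List String)
    (is : List Int) :
    tcOuterA d words is
      = is.findSome? (fun i => tcInnerA d words i
          (PySem.List.pyRange (words.length : Int) i (-1))) := by
  induction is with
  | nil => rfl
  | cons i is ih =>
    simp only [tcOuterA, List.findSome?]
    cases h : tcInnerA d words i (PySem.List.pyRange (words.length : Int) i (-1)) <;>
      simp [ih]


lemma findSome?_flatMap {α β γ : Type} (l : List α) (f : α → List β) (g : β → Option γ) :
    (l.flatMap f).findSome? g = l.findSome? (fun x => (f x).findSome? g) := by
  induction l with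
  | nil => rfl
  | cons x l ih =>
    rw [List.flatMap_cons, List.findSome?_append, List.findSome?]
    cases h : (f x).findSome? g <;> simp [ih]

lemma findSome?_congr_mem {α β : Type} (f g : α → Option β) (l : List α)
    (h : ∀ x ∈ l, f x = g x) : l.findSome? f = l.findSome? g := by
  induction l with
  | nil => rfl
  | cons x l ih =>
    have hx := h x List.mem_cons_self
    have ih' := ih (fun y hy => h y (List.mem_cons_of_mem _ hy))
    simp [List.findSome?, hx, ih']

lemma findSome?_eq_findSome?_filter {α β : Type} (p : α → Bool) (f : α → Option β) (l : List α)
    (h : ∀ x ∈ l, p x = false → f x = none) :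
    l.findSome? f = (l.filter p).findSome? f := by
  induction l with
  | nil => rfl
  | cons x l ih =>
    have ih' := ih (fun y hy => h y (List.mem_cons_of_mem _ hy))
    by_cases hx : p x
    · cases hfx : f x <;> simp [List.findSome?, hx, hfx, ih']
    · have hfx : f x = none := h x (List.mem_cons_self) (by simpa using hx)
      simp [List.findSome?, hx, hfx, ih']

-- ---- counting spaces ----

lemma count_go_space (l : List Char) : ∀ (fuel acc : Nat), l.length ≤ fuel →
    PySem.Chars.count.go [' '] fuel l acc = acc + l.count ' ' := by
  induction l with
  | nil => intro fuel acc _; cases fuel <;> simp [PySem.Chars.count.go]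
  | cons c t ih =>
    intro fuel acc hf
    cases fuel with
    | zero => simp at hf
    | succ f =>
      rw [PySem.Chars.count.go]
      by_cases hc : c = ' '
      · subst hc
        simp only [List.isPrefixOf, BEq.rfl, Bool.true_and, if_pos]
        rw [show List.drop [' '].length (' ' :: t) = t from rfl]
        rw [ih f (acc + 1) (by simpa using hf)]
        simp
        omega
      · have : ([' '].isPrefixOf (c :: t)) = false := by
          simp [List.isPrefixOf]
          exact fun h => absurd h.symm hc
        rw [if_neg (by simp [this])]
        rw [ih f acc (by simpa using Nat.le_of_succ_le_succ hf)]
        simp [hc]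

lemma count_space (cs : List Char) : PySem.Chars.count cs [' '] = cs.count ' ' := by
  simpa [PySem.Chars.count] using count_go_space cs cs.length 0 le_rfl

lemma count_space_join (ps : List (List Char)) (hne : ps ≠ [])
    (hs : ∀ p ∈ ps, ' ' ∉ p) :
    (PySem.Chars.join [' '] ps).count ' ' = ps.length - 1 := by
  induction ps with
  | nil => exact absurd rfl hne
  | cons p ps ih =>
    cases ps with
    | nil =>
      rw [PySem.Chars.join_singleton]
      simp [List.count_eq_zero.mpr (hs p (by simp))]
    | cons q qs =>
      rw [PySem.Chars.join_cons_cons]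
      have h1 : p.count ' ' = 0 := List.count_eq_zero.mpr (hs p (by simp))
      have h2 := ih (by simp) (fun r hr => hs r (List.mem_cons_of_mem _ hr))
      simp [List.count_append, h1, h2]

-- word-count of a joined phrase of space-free words
lemma wc_join (sub : List String) (hne : sub ≠ []) (hs : ∀ w ∈ sub, ' ' ∉ w.toList) :
    ((PySem.Str.count (PySem.Str.join " " sub) " " : Int) + 1) = sub.length := by
  have hsep : (" " : String).toList = [' '] := rfl
  rw [PySem.Str.count_eq, PySem.Str.toList_join, hsep, count_space]
  rw [count_space_join (sub.map String.toList) (by simpa using hne)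
    (by intro p hp; obtain ⟨w, hw, rfl⟩ := List.mem_map.mp hp; exact hs w hw)]
  have : 1 ≤ sub.length := List.length_pos_iff.mpr hne
  simp only [List.length_map]
  omega

-- ---- pieces of a split by " " contain no space ----

lemma splitOn_go_nospace : ∀ (fuel : Nat) (l cur : List Char) (acc : List (List Char)),
    l.length < fuel → (' ' ∉ cur) → (∀ p ∈ acc, ' ' ∉ p) →
    ∀ p ∈ PySem.Chars.splitOn.go [' '] fuel l cur acc, ' ' ∉ p := by
  intro fuel
  induction fuel with
  | zero => intro l cur acc h; exact absurd h (by omega)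
  | succ f ih =>
    intro l cur acc hf hcur hacc p hp
    cases l with
    | nil =>
      rw [PySem.Chars.splitOn.go] at hp
      simp only [List.mem_reverse, List.mem_cons] at hp
      rcases hp with h | h
      · subst h; simpa using hcur
      · exact hacc p h
      · exact fun h => absurd h (by omega)
    | cons c t =>
      rw [PySem.Chars.splitOn.go] at hp
      by_cases hc : c = ' '
      · subst hc
        rw [if_pos (by simp [List.isPrefixOf])] at hp
        have hp' : p ∈ PySem.Chars.splitOn.go [' '] f t [] (cur.reverse :: acc) := by
          simpa using hp
        exact ih t [] (cur.reverse :: acc) (by simpa using hf) (by simp)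
          (by intro q hq; rcases List.mem_cons.mp hq with h | h
              · subst h; simpa using hcur
              · exact hacc q h) p hp'
      · rw [if_neg (by simp [List.isPrefixOf]; exact fun h => absurd h.symm hc)] at hp
        exact ih t (c :: cur) acc (by simpa using Nat.lt_of_succ_lt_succ hf)
          (by simp [hcur]; exact fun h => hc h.symm) hacc p hp

lemma words_nospace (s : String) :
    ∀ w ∈ (PySem.Str.split? s " ").getD [], ' ' ∉ w.toList := by
  have hmap := PySem.Str.split?_map s " "
  have hsep : (" " : String).toList = [' '] := rfl
  rw [hsep] at hmap
  have hsplit : PySem.Chars.split? s.toList [' '] = some (PySem.Chars.splitOn s.toList [' ']) := by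
    simp [PySem.Chars.split?]
  rw [hsplit] at hmap
  cases hws : PySem.Str.split? s " " with
  | none => simp [hws] at hmap
  | some ws =>
    rw [hws] at hmap
    simp only [Option.map_some, Option.some.injEq] at hmap
    intro w hw
    have : w.toList ∈ PySem.Chars.splitOn s.toList [' '] := by
      rw [← hmap]
      exact List.mem_map_of_mem (by simpa [hws] using hw)
    exact fun hsp => splitOn_go_nospace (s.toList.length + 1) s.toList [] []
      (by omega) (by simp) (by simp) w.toList this hsp

-- ---- the failed-lookup lemma ----

lemma tcF_none_of_not_mem (refdict : List (String × String)) (words : List String)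
    (hw : ∀ w ∈ words, ' ' ∉ w.toList) (i j : Int)
    (h0 : 0 ≤ i) (hij : i < j) (hjn : j ≤ (words.length : Int))
    (hS : (j - i) ∉ tcS refdict) :
    tcF (PySem.Dict.mk refdict) words i j = none := by
  by_contra hne
  obtain ⟨v, hv⟩ := Option.ne_none_iff_exists'.mp hne
  unfold tcF PySem.Dict.get? at hv
  obtain ⟨pair, hfind⟩ : ∃ p, (PySem.Dict.mk refdict).items.find?
      (fun p => p.1 == PySem.Str.join " " (PySem.List.slice words (some i) (some j))) = some p := by
    cases hf : (PySem.Dict.mk refdict).items.find?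
        (fun p => p.1 == PySem.Str.join " " (PySem.List.slice words (some i) (some j))) with
    | none => rw [hf] at hv; simp at hv
    | some p => exact ⟨p, rfl⟩
  have hmem : pair ∈ refdict := List.mem_of_find?_eq_some hfind
  have hkey : pair.1 = PySem.Str.join " " (PySem.List.slice words (some i) (some j)) := by
    have := List.find?_some hfind
    simpa using this
  set sub := PySem.List.slice words (some i) (some j) with hsub
  have hslice : sub = (words.drop i.toNat).take (j.toNat - i.toNat) :=
    PySem.List.slice_toNat words h0 (by omega)
  have hlen : (sub.length : Int) = j - i := by
    rw [hslice]
    simp only [List.length_take, List.length_drop]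
    have h1 : j.toNat ≤ words.length := by omega
    have h2 : i.toNat < j.toNat := by omega
    omega
  have hne' : sub ≠ [] := by
    intro h; rw [h] at hlen; simp at hlen; omega
  have hsubs : ∀ w ∈ sub, ' ' ∉ w.toList := by
    intro w hwmem
    exact hw w (PySem.List.mem_of_mem_slice _ _ _ hwmem)
  have hwc : ((PySem.Str.count pair.1 " " : Int) + 1) = j - i := by
    rw [hkey, wc_join sub hne' hsubs]; exact hlen
  apply hS
  unfold tcS
  rw [PySem.Set.mem_ofList]
  rw [← hwc]
  exact List.mem_map_of_mem hmem

-- every key word-count is positive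
lemma tcS_pos (refdict : List (String × String)) : ∀ L ∈ tcS refdict, 1 ≤ L := by
  intro L hL
  unfold tcS at hL
  rw [PySem.Set.mem_ofList] at hL
  obtain ⟨kv, _, rfl⟩ := List.mem_map.mp hL
  omega

-- ---- the candidate lists coincide ----

lemma candidates_eq (refdict : List (String × String)) (n i : Int) :
    (PySem.List.pyRange n i (-1)).filter (fun j => decide ((j - i) ∈ tcS refdict))
      = ((PySem.List.sorted (tcS refdict) (fun x => x) true).filter
          (fun L => decide (L ≤ n - i))).map (fun L => i + L) := by
  set lengths := PySem.List.sorted (tcS refdict) (fun x => x) true with hlen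
  have hperm : lengths.Perm (tcS refdict) := PySem.List.sorted_perm _ _ _
  have hnodupS : (tcS refdict).Nodup := PySem.Set.nodup_ofList _
  have hnodupL : lengths.Nodup := hperm.nodup_iff.mpr hnodupS
  have hmemL : ∀ L, L ∈ lengths ↔ L ∈ tcS refdict := fun L => hperm.mem_iff
  have hnodupR : (PySem.List.pyRange n i (-1)).Nodup := by
    rw [PySem.List.pyRange_neg_one_eq_reverse]
    rw [List.nodup_reverse]
    exact PySem.List.nodup_pyRange_one _ _
  have hdescR : (PySem.List.pyRange n i (-1)).Pairwise (fun a b => b < a) := by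
    rw [PySem.List.pyRange_neg_one_eq_reverse]
    rw [List.pairwise_reverse]
    exact PySem.List.pairwise_lt_pyRange_one _ _
  have hL1 : ((PySem.List.pyRange n i (-1)).filter
      (fun j => decide ((j - i) ∈ tcS refdict))).Nodup := hnodupR.filter _
  have hL2 : ((PySem.List.pyRange n i (-1)).filter
      (fun j => decide ((j - i) ∈ tcS refdict))).Pairwise (fun a b => b < a) := hdescR.filter _
  have hdescL : lengths.Pairwise (fun a b => b < a) := by
    have h1 : lengths.Pairwise (fun a b => b ≤ a) := PySem.List.sorted_pairwise_rev _ _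
    have h2 : lengths.Pairwise (fun a b => a ≠ b) := hnodupL
    exact (h1.and h2).imp (fun h => lt_of_le_of_ne h.1 (fun he => h.2 he.symm))
  have hR1 : (((lengths.filter (fun L => decide (L ≤ n - i))).map (fun L => i + L))).Nodup := by
    refine (List.nodup_map_iff ?_).mpr (hnodupL.filter _)
    intro a b h
    simp only at h
    omega
  have hR2 : (((lengths.filter (fun L => decide (L ≤ n - i))).map (fun L => i + L))).Pairwise
      (fun a b => b < a) := by
    refine List.Pairwise.map _ ?_ (hdescL.filter _)
    intro a b h; omega
  have hmem : ∀ j, (j ∈ (PySem.List.pyRange n i (-1)).filter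
      (fun j => decide ((j - i) ∈ tcS refdict))
      ↔ j ∈ ((lengths.filter (fun L => decide (L ≤ n - i))).map (fun L => i + L))) := by
    intro j
    simp only [List.mem_filter, List.mem_map, PySem.List.mem_pyRange_neg_one, decide_eq_true_eq]
    constructor
    · rintro ⟨⟨hij, hjn⟩, hjS⟩
      exact ⟨j - i, ⟨(hmemL _).mpr hjS, by omega⟩, by omega⟩
    · rintro ⟨L, ⟨hLmem, hLle⟩, rfl⟩
      have hpos := tcS_pos refdict L ((hmemL _).mp hLmem)
      refine ⟨⟨by omega, by omega⟩, ?_⟩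
      simpa using (hmemL _).mp hLmem
  have hperm2 : ((PySem.List.pyRange n i (-1)).filter
      (fun j => decide ((j - i) ∈ tcS refdict))).Perm
      (((lengths.filter (fun L => decide (L ≤ n - i))).map (fun L => i + L))) :=
    (List.perm_ext_iff_of_nodup hL1 hR1).mpr hmem
  exact hperm2.eq_of_pairwise
    (fun a b _ _ h1 h2 => le_antisymm h2 h1)
    (hL2.imp le_of_lt) (hR2.imp le_of_lt)

-- ---- per-start agreement: A's inner scan = B's candidate block for start i ----

lemma inner_eq_block (refdict : List (String × String)) (words : List String)
    (hw : ∀ w ∈ words, ' ' ∉ w.toList) (i : Int) (h0 : 0 ≤ i) :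
    tcInnerA (PySem.Dict.mk refdict) words i
        (PySem.List.pyRange (words.length : Int) i (-1))
      = (((PySem.List.sorted (tcS refdict) (fun x => x) true).filter
            (fun L => decide (L ≤ (words.length : Int) - i))).map (fun L =>
              PySem.Str.join " " (PySem.List.slice words (some i) (some (i + L))))).findSome?
          (fun name => (PySem.Dict.mk refdict).get? name) := by
  rw [tcInnerA_eq_findSome?]
  rw [findSome?_eq_findSome?_filter (fun j => decide ((j - i) ∈ tcS refdict))
    (tcF (PySem.Dict.mk refdict) words i)
    (PySem.List.pyRange (words.length : Int) i (-1))
    (by intro j hj hp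
        rw [PySem.List.mem_pyRange_neg_one] at hj
        exact tcF_none_of_not_mem refdict words hw i j h0 hj.1 hj.2 (by simpa using hp))]
  rw [candidates_eq refdict _ i, List.findSome?_map, List.findSome?_map]
  rfl

-- ===== VERDICT (by name: the statement is the Claim_ definition above) =====
theorem text_contains_spec : Claim_equal_text_contains := by
  intro text refdict _
  unfold Spec_text_contains text_contains text_contains_alt
  simp only []
  rw [tcOuterA_eq_findSome?, findSome?_flatMap]
  apply findSome?_congr_mem
  intro i hi
  rw [PySem.List.mem_pyRange_one] at hi
  rw [inner_eq_block refdict _ (words_nospace (PySem.Str.lower text)) i hi.1]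
  simp only [tcS]
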